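-- pv_equiv track=rewrite | github.com/aperdomoll90/quartz-council | src/quartzcouncil/github/client/diff_parser.py | snap_to_nearest_valid_line
-- ===== SOURCE A (Python) =====
-- def snap_to_nearest_valid_line(
--     filename: str,
--     line_number: int,
--     file_line_map: dict[str, set[int]],
--     max_distance: int = 5,
-- ) -> int | None:
--     """
--     Find the closest valid line number for a comment.
--
--     If the exact line is valid, returns it unchanged.
--     Otherwise finds the nearest valid line within max_distance.
--     Returns None if no valid line is close enough (to avoid misplaced comments).
--     """
--     valid_lines = file_line_map.get(filename)
--     if not valid_lines:
--         return None
--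
--     # If exact line is valid, use it
--     if line_number in valid_lines:
--         return line_number
--
--     # Find the closest valid line within max_distance
--     sorted_lines = sorted(valid_lines)
--     best_line = None
--     best_distance = float("inf")
--
--     for valid_line in sorted_lines:
--         distance = abs(valid_line - line_number)
--         # Only consider lines within max_distance
--         if distance <= max_distance and distance < best_distance:
--             best_distance = distance
--             best_line = valid_line
--
--     return best_line
-- ===== SOURCE B (Python) =====
-- def snap_to_nearest_valid_line(
--     filename: str,
--     line_number: int,
--     file_line_map: dict[str, set[int]],
--     max_distance: int = 5,
-- ) -> int | None:
--     """Probe outward from line_number instead of scanning all valid lines."""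
--     valid_lines = file_line_map.get(filename)
--     if not valid_lines:
--         return None
--     if line_number in valid_lines:
--         return line_number
--     # No valid line can be farther than the farthest one; cap the probe there.
--     farthest = max(abs(v - line_number) for v in valid_lines)
--     limit = min(max_distance, farthest)
--     for d in range(1, limit + 1):
--         if line_number - d in valid_lines:
--             return line_number - d
--         if line_number + d in valid_lines:
--             return line_number + d
--     return None
-- ===== Notes on version B (the rewrite author's own statement) =====
-- stated objective: alternative
-- what changed: Instead of sorting all valid lines and scanning them keeping the best distance, B probes offsets 1..max_distance outward from line_number (lower side first, matching A's tie rule) with set membership tests, capped by the farthest valid line.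
import Mathlib
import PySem

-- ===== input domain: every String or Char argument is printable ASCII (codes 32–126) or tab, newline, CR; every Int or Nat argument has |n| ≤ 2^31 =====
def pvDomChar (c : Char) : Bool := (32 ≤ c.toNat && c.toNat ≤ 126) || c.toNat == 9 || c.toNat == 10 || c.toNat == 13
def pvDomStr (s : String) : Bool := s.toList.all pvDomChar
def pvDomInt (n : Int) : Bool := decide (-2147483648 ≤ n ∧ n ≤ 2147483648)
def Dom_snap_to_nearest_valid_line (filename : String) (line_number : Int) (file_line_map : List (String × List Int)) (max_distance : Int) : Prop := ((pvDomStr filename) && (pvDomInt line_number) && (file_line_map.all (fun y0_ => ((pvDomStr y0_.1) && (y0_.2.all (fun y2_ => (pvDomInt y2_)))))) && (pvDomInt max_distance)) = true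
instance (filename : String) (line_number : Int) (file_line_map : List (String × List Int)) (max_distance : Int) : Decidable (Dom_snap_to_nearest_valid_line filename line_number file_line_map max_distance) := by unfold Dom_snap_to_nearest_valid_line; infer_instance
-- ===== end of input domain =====

-- ===== PORT A =====
-- B changes the search: probing offsets outward from line_number instead of sorting and scanning all valid lines.
-- A's float("inf") initial best_distance is encoded as 'none' in an Option Int (the loop never returns it,
-- and 'distance < inf' is always true, i.e. '∀ bd ∈ none, distance < bd').
def snapStepA (line_number max_distance : Int) (b : Option Int × Option Int) (valid_line : Int) : Option Int × Option Int :=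
  let distance := |valid_line - line_number|
  if distance ≤ max_distance ∧ ∀ bd ∈ b.2, distance < bd then
    (some valid_line, some distance)
  else b

def snap_to_nearest_valid_line (filename : String) (line_number : Int) (file_line_map : List (String × List Int)) (max_distance : Int) : Option Int :=
  match (PySem.Dict.mk file_line_map).get? filename with
  | none => none
  | some valid_lines =>
    if valid_lines = [] then none
    else if line_number ∈ valid_lines then some line_number
    else
      let sorted_lines := PySem.List.sorted valid_lines (fun x => x) false
      (sorted_lines.foldl (snapStepA line_number max_distance) (none, none)).1

-- ===== PORT B =====
def snapProbeB (valid_lines : List Int) (line_number : Int) : List Int → Option Int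
  | [] => none
  | d :: ds =>
    if line_number - d ∈ valid_lines then some (line_number - d)
    else if line_number + d ∈ valid_lines then some (line_number + d)
    else snapProbeB valid_lines line_number ds

def snap_to_nearest_valid_line_alt (filename : String) (line_number : Int) (file_line_map : List (String × List Int)) (max_distance : Int) : Option Int :=
  match (PySem.Dict.mk file_line_map).get? filename with
  | none => none
  | some valid_lines =>
    match valid_lines with
    | [] => none
    | x :: t =>
      if line_number ∈ x :: t then some line_number
      else
        let farthest := t.foldl (fun m v => max m |v - line_number|) |x - line_number|
        let limit := min max_distance farthest
        snapProbeB (x :: t) line_number (PySem.List.pyRange 1 (limit + 1) 1)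

-- ===== PRECONDITION & SPEC =====
def Spec_snap_to_nearest_valid_line (filename : String) (line_number : Int) (file_line_map : List (String × List Int)) (max_distance : Int) (out : Option Int) : Prop := out = snap_to_nearest_valid_line_alt filename line_number file_line_map max_distance
instance (filename : String) (line_number : Int) (file_line_map : List (String × List Int)) (max_distance : Int) (out : Option Int) : Decidable (Spec_snap_to_nearest_valid_line filename line_number file_line_map max_distance out) := by unfold Spec_snap_to_nearest_valid_line; infer_instance

-- ===== CLAIM (what is proved, stated in full; the proofs are below) =====
def Claim_equal_snap_to_nearest_valid_line : Prop := ∀ (filename : String) (line_number : Int) (file_line_map : List (String × List Int)) (max_distance : Int), Dom_snap_to_nearest_valid_line filename line_number file_line_map max_distance → Spec_snap_to_nearest_valid_line filename line_number file_line_map max_distance (snap_to_nearest_valid_line filename line_number file_line_map max_distance)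

-- ===== LEMMAS AND PROOFS =====

-- accumulator invariant for A's fold: empty, or current best with its (cached) distance ≤ max_distance
def SnapInv (ln md : Int) (a : Option Int × Option Int) : Prop :=
  a = (none, none) ∨ ∃ v, a = (some v, some |v - ln|) ∧ |v - ln| ≤ md

-- characterization of A's fold over a ≤-sorted list: either the accumulator survives (everything in
-- range is dominated by it) or the result is an in-range element of minimal distance, least on ties
theorem snap_foldA_char (ln md : Int) (l : List Int) (hs : l.Pairwise (· ≤ ·)) :
    ∀ (a : Option Int × Option Int), SnapInv ln md a →
    ( (l.foldl (snapStepA ln md) a = a ∧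
        ∀ w ∈ l, |w - ln| ≤ md → ∃ bv bd, a = (some bv, some bd) ∧ bd ≤ |w - ln|)
    ∨ (∃ v, l.foldl (snapStepA ln md) a = (some v, some |v - ln|) ∧ v ∈ l ∧ |v - ln| ≤ md
        ∧ (∀ bd ∈ a.2, |v - ln| < bd)
        ∧ (∀ w ∈ l, |w - ln| ≤ md → |v - ln| ≤ |w - ln|)
        ∧ (∀ w ∈ l, |w - ln| = |v - ln| → v ≤ w)) ) := by
  induction l with
  | nil => intro a _; left; exact ⟨rfl, by simp⟩
  | cons x t ih =>
    intro a hInv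
    have hs' : t.Pairwise (· ≤ ·) := hs.of_cons
    have hxle : ∀ w ∈ t, x ≤ w := fun w hw => List.rel_of_pairwise_cons hs hw
    by_cases hc : |x - ln| ≤ md ∧ ∀ bd ∈ a.2, |x - ln| < bd
    · -- step takes x
      have hstep : snapStepA ln md a x = (some x, some |x - ln|) := by
        simp only [snapStepA]; rw [if_pos hc]
      have hInv' : SnapInv ln md (some x, some |x - ln|) := Or.inr ⟨x, rfl, hc.1⟩
      have := ih hs' (some x, some |x - ln|) hInv'
      simp only [List.foldl_cons, hstep]
      rcases this with ⟨heq, hdom⟩ | ⟨v, hr, hv, hvd, hlt, hmin, htie⟩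
      · right
        refine ⟨x, heq, List.mem_cons_self, hc.1, hc.2, ?_, ?_⟩
        · intro w hw hwd
          rcases List.mem_cons.mp hw with h | h
          · subst h; exact le_rfl
          · obtain ⟨bv, bd, hab, hble⟩ := hdom w h hwd
            have h2 : bd = |x - ln| := by
              have := congrArg Prod.snd hab; simp at this; omega
            omega
        · intro w hw _
          rcases List.mem_cons.mp hw with h | h
          · subst h; exact le_rfl
          · exact hxle w h
      · right
        have hvx : |v - ln| < |x - ln| := hlt |x - ln| rfl
        refine ⟨v, hr, List.mem_cons_of_mem x hv, hvd, ?_, ?_, ?_⟩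
        · intro bd hbd
          rcases hInv with h0 | ⟨u, hu, _⟩
          · rw [h0] at hbd; simp at hbd
          · rw [hu] at hbd; simp only [Option.mem_def, Option.some.injEq] at hbd
            have := hc.2 |u - ln| (by rw [hu]; rfl)
            omega
        · intro w hw hwd
          rcases List.mem_cons.mp hw with h | h
          · subst h; omega
          · exact hmin w h hwd
        · intro w hw hwd
          rcases List.mem_cons.mp hw with h | h
          · subst h; omega
          · exact htie w h hwd
    · -- step skips x
      have hstep : snapStepA ln md a x = a := by
        simp only [snapStepA]; rw [if_neg hc]
      have hskip : |x - ln| ≤ md → ∃ u, a = (some u, some |u - ln|) ∧ |u - ln| ≤ |x - ln| ∧ |u - ln| ≤ md := by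
        intro hxmd
        rcases hInv with h0 | ⟨u, hu, hud⟩
        · exact absurd ⟨hxmd, by subst h0; simp⟩ hc
        · refine ⟨u, hu, ?_, hud⟩
          by_contra hlt'
          apply hc
          refine ⟨hxmd, ?_⟩
          intro bd hbd
          rw [hu] at hbd; simp only [Option.mem_def, Option.some.injEq] at hbd
          omega
      have := ih hs' a hInv
      simp only [List.foldl_cons, hstep]
      rcases this with ⟨heq, hdom⟩ | ⟨v, hr, hv, hvd, hlt, hmin, htie⟩
      · left
        refine ⟨heq, ?_⟩
        intro w hw hwd
        rcases List.mem_cons.mp hw with h | h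
        · subst h
          obtain ⟨u, hu, hux, _⟩ := hskip hwd
          exact ⟨u, |u - ln|, hu, hux⟩
        · exact hdom w h hwd
      · right
        refine ⟨v, hr, List.mem_cons_of_mem x hv, hvd, hlt, ?_, ?_⟩
        · intro w hw hwd
          rcases List.mem_cons.mp hw with h | h
          · subst h
            obtain ⟨u, hu, hux, _⟩ := hskip hwd
            have := hlt |u - ln| (by rw [hu]; rfl)
            omega
          · exact hmin w h hwd
        · intro w hw hwd
          rcases List.mem_cons.mp hw with h | h
          · subst h
            obtain ⟨u, hu, hux, _⟩ := hskip (by omega)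
            have := hlt |u - ln| (by rw [hu]; rfl)
            omega
          · exact htie w h hwd

-- characterization of B's probe over the range [a, a+n): none and no hit anywhere, or a first hit
theorem snap_probe_char (vl : List Int) (ln : Int) :
    ∀ (n : Nat) (a : Int),
    ( (snapProbeB vl ln (PySem.List.pyRange a (a + n) 1) = none ∧
        ∀ d, a ≤ d → d < a + n → (ln - d) ∉ vl ∧ (ln + d) ∉ vl)
    ∨ (∃ d, a ≤ d ∧ d < a + n ∧ (∀ e, a ≤ e → e < d → (ln - e) ∉ vl ∧ (ln + e) ∉ vl) ∧
        (((ln - d) ∈ vl ∧ snapProbeB vl ln (PySem.List.pyRange a (a + n) 1) = some (ln - d))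
         ∨ ((ln - d) ∉ vl ∧ (ln + d) ∈ vl ∧ snapProbeB vl ln (PySem.List.pyRange a (a + n) 1) = some (ln + d)))) ) := by
  intro n
  induction n with
  | zero =>
    intro a
    left
    rw [show a + ((0:Nat):Int) = a by omega, PySem.List.pyRange_one_eq_nil (by omega)]
    exact ⟨rfl, by omega⟩
  | succ n ih =>
    intro a
    have hcons : PySem.List.pyRange a (a + ((n:Nat) + 1 : Nat)) 1 = a :: PySem.List.pyRange (a + 1) (a + ((n:Nat) + 1 : Nat)) 1 :=
      PySem.List.pyRange_one_cons (by push_cast; omega)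
    have hrange : PySem.List.pyRange (a + 1) (a + ((n:Nat) + 1 : Nat)) 1 = PySem.List.pyRange (a + 1) ((a + 1) + (n:Int)) 1 := by
      congr 1; push_cast; ring
    rw [hcons, hrange]
    by_cases h1 : (ln - a) ∈ vl
    · right
      exact ⟨a, le_refl a, by push_cast; omega, by omega,
        Or.inl ⟨h1, by simp [snapProbeB, h1]⟩⟩
    · by_cases h2 : (ln + a) ∈ vl
      · right
        exact ⟨a, le_refl a, by push_cast; omega, by omega,
          Or.inr ⟨h1, h2, by simp [snapProbeB, h1, h2]⟩⟩
      · have hrec : snapProbeB vl ln (a :: PySem.List.pyRange (a + 1) ((a + 1) + (n:Int)) 1)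
            = snapProbeB vl ln (PySem.List.pyRange (a + 1) ((a + 1) + (n:Int)) 1) := by
          simp [snapProbeB, h1, h2]
        rw [hrec]
        have ih' := ih (a + 1)
        rw [show (a + 1) + ((n:Nat):Int) = (a + 1) + (n:Int) by ring] at ih'
        rcases ih' with ⟨hnone, hno⟩ | ⟨d, hd1, hd2, hpre, hhit⟩
        · left
          refine ⟨hnone, ?_⟩
          intro d hda hdu
          by_cases hde : d = a
          · subst hde; exact ⟨h1, h2⟩
          · exact hno d (by omega) (by push_cast at hdu ⊢; omega)
        · right
          refine ⟨d, by omega, by push_cast; omega, ?_, hhit⟩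
          intro e hea hed
          by_cases hee : e = a
          · subst hee; exact ⟨h1, h2⟩
          · exact hpre e (by omega) hed

-- fold max dominates its seed and every element
theorem snap_foldmax_ge (ln : Int) (t : List Int) :
    ∀ (m : Int), m ≤ t.foldl (fun m v => max m |v - ln|) m ∧
      ∀ v ∈ t, |v - ln| ≤ t.foldl (fun m v => max m |v - ln|) m := by
  induction t with
  | nil => intro m; exact ⟨le_refl m, by simp⟩
  | cons x t ih =>
    intro m
    obtain ⟨h1, h2⟩ := ih (max m |x - ln|)
    simp only [List.foldl_cons]
    refine ⟨le_trans (le_max_left _ _) h1, ?_⟩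
    intro v hv
    rcases List.mem_cons.mp hv with h | h
    · subst h; exact le_trans (le_max_right _ _) h1
    · exact h2 v h

-- core equivalence on a nonempty valid-line list not containing line_number
theorem snap_core (x : Int) (t : List Int) (ln md : Int) (hnm : ln ∉ x :: t) :
    ((PySem.List.sorted (x :: t) (fun y => y) false).foldl (snapStepA ln md) (none, none)).1
    = snapProbeB (x :: t) ln
        (PySem.List.pyRange 1 (min md (t.foldl (fun m v => max m |v - ln|) |x - ln|) + 1) 1) := by
  set vl := x :: t with hvl
  set far := t.foldl (fun m v => max m |v - ln|) |x - ln| with hfar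
  have hfarx := snap_foldmax_ge ln t |x - ln|
  have hfarall : ∀ v ∈ vl, |v - ln| ≤ far := by
    intro v hv
    rcases List.mem_cons.mp hv with h | h
    · subst h; exact hfarx.1
    · exact hfarx.2 v h
  set limit := min md far with hlimit
  set s := PySem.List.sorted vl (fun y => y) false with hsdef
  have hsmem : ∀ y, y ∈ s ↔ y ∈ vl := fun y => PySem.List.mem_sorted vl (fun y => y) false y
  have hsp : s.Pairwise (· ≤ ·) := PySem.List.sorted_pairwise (xs := vl) (key := fun y => y)
  have hA := snap_foldA_char ln md s hsp (none, none) (Or.inl rfl)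
  by_cases hlim : 1 ≤ limit
  case neg =>
    have hempty : PySem.List.pyRange 1 (limit + 1) 1 = [] := PySem.List.pyRange_one_eq_nil (by omega)
    rw [hempty]
    simp only [snapProbeB]
    rcases hA with ⟨heq, _⟩ | ⟨v, hr, hv, hvd, _, _, _⟩
    · rw [heq]
    · exfalso
      have hvvl : v ∈ vl := (hsmem v).mp hv
      have hvne : v ≠ ln := fun h => hnm (h ▸ hvvl)
      have h1 : (1:Int) ≤ |v - ln| := by rcases abs_cases (v - ln) with ⟨hh1, hh2⟩ | ⟨hh1, hh2⟩ <;> omega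
      have h2 := hfarall v hvvl
      omega
  case pos =>
    have hn : limit + 1 = 1 + (limit.toNat : Int) := by omega
    rw [hn]
    have hB := snap_probe_char vl ln limit.toNat 1
    rcases hA with ⟨heq, hdom⟩ | ⟨v, hr, hv, hvd, _, hmin, htie⟩
    · rw [heq]
      rcases hB with ⟨hnone, _⟩ | ⟨d, hd1, hd2, _, hhit⟩
      · rw [hnone]
      · exfalso
        have hdlim : d ≤ limit := by omega
        rcases hhit with ⟨hmem, _⟩ | ⟨_, hmem, _⟩
        · have h := hdom (ln - d) ((hsmem _).mpr hmem) (by rw [abs_of_nonpos (by omega)]; omega)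
          obtain ⟨_, _, habs, _⟩ := h; simp at habs
        · have h := hdom (ln + d) ((hsmem _).mpr hmem) (by rw [abs_of_nonneg (by omega)]; omega)
          obtain ⟨_, _, habs, _⟩ := h; simp at habs
    · have hvvl : v ∈ vl := (hsmem v).mp hv
      have hvne : v ≠ ln := fun h => hnm (h ▸ hvvl)
      have hD1 : 1 ≤ |v - ln| := by rcases abs_cases (v - ln) with ⟨hh1, hh2⟩ | ⟨hh1, hh2⟩ <;> omega
      have hDlim : |v - ln| ≤ limit := le_min hvd (hfarall v hvvl)
      have hvcase : v = ln - |v - ln| ∨ v = ln + |v - ln| := by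
        rcases abs_cases (v - ln) with ⟨hh1, hh2⟩ | ⟨hh1, hh2⟩ <;> [right; left] <;> omega
      have hAval : (s.foldl (snapStepA ln md) (none, none)).1 = some v := by rw [hr]
      rw [hAval]
      rcases hB with ⟨_, hno⟩ | ⟨d, hd1, hd2, hpre, hhit⟩
      · exfalso
        have := hno |v - ln| hD1 (by omega)
        rcases hvcase with hvc | hvc <;> rw [← hvc] at this <;> tauto
      · have hdlim : d ≤ limit := by omega
        have hdD : d = |v - ln| := by
          have hle1 : d ≤ |v - ln| := by
            by_contra hgt
            have := hpre |v - ln| hD1 (by omega)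
            rcases hvcase with hvc | hvc <;> rw [← hvc] at this <;> tauto
          have hle2 : |v - ln| ≤ d := by
            rcases hhit with ⟨hmem, _⟩ | ⟨_, hmem, _⟩
            · have h := hmin (ln - d) ((hsmem _).mpr hmem) (by rw [abs_of_nonpos (show ln - d - ln ≤ 0 by omega)]; omega)
              rw [abs_of_nonpos (show ln - d - ln ≤ 0 by omega)] at h; omega
            · have h := hmin (ln + d) ((hsmem _).mpr hmem) (by rw [abs_of_nonneg (show (0:Int) ≤ ln + d - ln by omega)]; omega)
              rw [abs_of_nonneg (show (0:Int) ≤ ln + d - ln by omega)] at h; omega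
          omega
        rcases hhit with ⟨hmem, hres⟩ | ⟨hnomem, hmem, hres⟩
        · rw [hres]
          rcases hvcase with hvc | hvc
          · rw [hvc, hdD]
          · exfalso
            have h := htie (ln - d) ((hsmem _).mpr hmem) (by rw [abs_of_nonpos (by omega)]; omega)
            omega
        · rw [hres]
          rcases hvcase with hvc | hvc
          · exfalso; rw [hvc, ← hdD] at hvvl; exact hnomem hvvl
          · rw [hvc, hdD]

-- ===== VERDICT (by name: the statement is the Claim_ definition above) =====
theorem snap_to_nearest_valid_line_spec : Claim_equal_snap_to_nearest_valid_line := by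
  intro filename line_number file_line_map max_distance _
  unfold Spec_snap_to_nearest_valid_line snap_to_nearest_valid_line snap_to_nearest_valid_line_alt
  cases hget : (PySem.Dict.mk file_line_map).get? filename with
  | none => rfl
  | some valid_lines =>
    cases valid_lines with
    | nil => simp
    | cons x t =>
      simp only [reduceCtorEq]
      by_cases hmem : line_number ∈ x :: t
      · simp [hmem]
      · simp only [if_neg hmem]
        exact snap_core x t line_number max_distance hmem
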